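-- pv_equiv track=rewrite | github.com/0xstillb/grimmory-bridge | python/grimmory_bridge/settings.py | _normalize_priority
-- ===== SOURCE A (Python) =====
-- from typing import Any
--
-- _TARGETS = ("calibre", "grimmory", "koreader")
--
-- DEFAULT_SETTINGS: dict[str, Any] = {
--     "always_dry_run_first": True,
--     "confirm_before_write": True,
--     "auto_refresh_grimmory": True,
--     "source_priority": ["calibre", "grimmory", "koreader"],
--     "enabled_kinds": ["epub", "pdf"],
--     "backup_before_write": True,
--     "backup_extension": ".bak",
--     "sidecar_metadata_name": ".metadata.json",
--     "sidecar_cover_name": ".cover.jpg",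
--     "overwrite_sidecars": True,
--     "prefer_embedded_over_sidecar": False,
--     "pdf_password": "",
--     "pdf_user_password": "",
--     "pdf_owner_password": "",
--     "pdf_reencrypt": True,
--     "pdf_encrypt_algorithm": "",
--     "theme": "dark",
--     "density": "comfy",
--     "accent": "indigo",
-- }
--
-- def _normalize_priority(value: Any) -> list[str]:
--     if not isinstance(value, list):
--         return list(DEFAULT_SETTINGS["source_priority"])
--     out: list[str] = []
--     for item in value:
--         text = str(item).lower().strip()
--         if text in _TARGETS and text not in out:
--             out.append(text)
--     for target in _TARGETS:
--         if target not in out: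
--             out.append(target)
--     return out
-- ===== SOURCE B (Python) =====
-- _TARGETS = ("calibre", "grimmory", "koreader")
--
-- DEFAULT_SETTINGS = {"source_priority": ["calibre", "grimmory", "koreader"]}
--
-- def _normalize_priority(value):
--     if not isinstance(value, list):
--         return list(DEFAULT_SETTINGS["source_priority"])
--     result = list(_TARGETS)
--     for item in reversed(value):
--         text = str(item).lower().strip()
--         if text in _TARGETS:
--             result = [text] + [u for u in result if u != text]
--     return result
-- ===== Notes on version B (the rewrite author's own statement) =====
-- stated objective: alternative
-- what changed: A's two passes (forward dedup-filter of targets, then append missing targets) are replaced by a single reverse scan with move-to-front over the full target list, eliminating the membership test against the growing output and the second loop.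
import Mathlib
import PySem

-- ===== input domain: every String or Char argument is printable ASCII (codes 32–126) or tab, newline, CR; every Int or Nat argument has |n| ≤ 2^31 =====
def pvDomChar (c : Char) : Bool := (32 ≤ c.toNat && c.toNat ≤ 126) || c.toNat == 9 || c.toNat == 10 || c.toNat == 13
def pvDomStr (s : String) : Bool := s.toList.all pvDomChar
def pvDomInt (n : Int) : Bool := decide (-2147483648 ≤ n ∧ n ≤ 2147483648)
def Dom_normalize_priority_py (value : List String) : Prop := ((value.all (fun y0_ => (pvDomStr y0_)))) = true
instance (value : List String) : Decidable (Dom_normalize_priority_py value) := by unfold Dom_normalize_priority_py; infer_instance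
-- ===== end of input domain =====

-- B replaces A's two-pass filter-and-append with a single reverse-scan move-to-front starting
-- from the full target list (objective: alternative decomposition, same cost).

-- ===== PORT A =====
-- _TARGETS
def pvTargets : List String := ["calibre", "grimmory", "koreader"]

-- text = str(item).lower().strip()  (item is already a str on this signature)
def pvNorm (item : String) : String := PySem.Str.strip (PySem.Str.lower item)

-- body of A's first loop
def pvStepA (out : List String) (item : String) : List String :=
  let text := pvNorm item
  if text ∈ pvTargets ∧ text ∉ out then out ++ [text] else out

-- body of A's second loop
def pvStep2 (out : List String) (target : String) : List String :=
  if target ∉ out then out ++ [target] else out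

def normalize_priority_py (value : List String) : List String :=
  pvTargets.foldl pvStep2 (value.foldl pvStepA [])

-- ===== PORT B =====
-- body of B's loop over reversed(value): move text to the front
def pvStepB (result : List String) (item : String) : List String :=
  let text := pvNorm item
  if text ∈ pvTargets then text :: result.filter (fun u => u != text) else result

def normalize_priority_py_alt (value : List String) : List String :=
  value.reverse.foldl pvStepB pvTargets

-- ===== PRECONDITION & SPEC =====
def Spec_normalize_priority_py (value : List String) (out : List String) : Prop := out = normalize_priority_py_alt value
instance (value : List String) (out : List String) : Decidable (Spec_normalize_priority_py value out) := by unfold Spec_normalize_priority_py; infer_instance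

-- ===== CLAIM (what is proved, stated in full; the proofs are below) =====
def Claim_equal_normalize_priority_py : Prop := ∀ (value : List String), Dom_normalize_priority_py value → Spec_normalize_priority_py value (normalize_priority_py value)

-- ===== LEMMAS AND PROOFS =====

-- B's fold peels off the head element of value (it is processed last in the reversed scan)
lemma alt_cons (x : String) (xs : List String) :
    normalize_priority_py_alt (x :: xs) = pvStepB (normalize_priority_py_alt xs) x := by
  simp [normalize_priority_py_alt, List.foldl_append]

-- A's second loop appends exactly the targets missing from out, in target order
lemma step2_filter (o : List String) :
    pvTargets.foldl pvStep2 o = o ++ pvTargets.filter (fun t => !o.contains t) := by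
  simp only [pvTargets, List.foldl_cons, List.foldl_nil, pvStep2, List.filter_cons,
    List.filter_nil]
  split_ifs <;> simp_all [List.mem_append]

-- main invariant: A's first loop from accumulator out, followed by the missing-target filter,
-- equals out followed by B's result restricted to targets not already in out
lemma main_inv (xs : List String) : ∀ (out : List String),
    (xs.foldl pvStepA out) ++ pvTargets.filter (fun t => !(xs.foldl pvStepA out).contains t)
      = out ++ (normalize_priority_py_alt xs).filter (fun u => !out.contains u) := by
  induction xs with
  | nil =>
      intro out
      simp [normalize_priority_py_alt, pvTargets]
  | cons x xs ih =>
      intro out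
      rw [List.foldl_cons, ih, alt_cons]
      by_cases ht : pvNorm x ∈ pvTargets
      · have hB : pvStepB (normalize_priority_py_alt xs) x
            = pvNorm x :: (normalize_priority_py_alt xs).filter (fun u => u != pvNorm x) := by
          simp only [pvStepB]; rw [if_pos ht]
        by_cases ho : pvNorm x ∈ out
        · have hA : pvStepA out x = out := by
            simp only [pvStepA]; rw [if_neg (fun h => h.2 ho)]
          rw [hA, hB, List.filter_cons_of_neg (by simpa using ho), List.filter_filter]
          refine congrArg (fun l => out ++ l) ?_
          apply List.filter_congr
          intro u hu
          by_cases hv : u ∈ out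
          · simp [hv]
          · have hune : u ≠ pvNorm x := fun h => hv (h ▸ ho)
            simp [hv, hune]
        · have hA : pvStepA out x = out ++ [pvNorm x] := by
            simp only [pvStepA]; rw [if_pos ⟨ht, ho⟩]
          rw [hA, hB, List.filter_cons_of_pos (by simpa using ho), List.filter_filter,
            List.append_assoc, List.singleton_append]
          refine congrArg (fun l => out ++ pvNorm x :: l) ?_
          apply List.filter_congr
          intro u hu
          by_cases hc : u = pvNorm x
          · simp [hc, List.mem_append]
          · simp [List.mem_append, hc]
      · have hA : pvStepA out x = out := by
          simp only [pvStepA]; rw [if_neg (fun h => ht h.1)]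
        have hB : pvStepB (normalize_priority_py_alt xs) x = normalize_priority_py_alt xs := by
          simp only [pvStepB]; rw [if_neg ht]
        rw [hA, hB]

-- ===== VERDICT (by name: the statement is the Claim_ definition above) =====
theorem normalize_priority_py_spec : Claim_equal_normalize_priority_py := by
  intro value _
  unfold Spec_normalize_priority_py normalize_priority_py
  rw [step2_filter, main_inv value []]
  simp
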